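-- pv_equiv track=rewrite | github.com/yuzhema/test3 | admins_app/views.py | numchar
-- ===== SOURCE A (Python) =====
-- def numchar(n):
--     a,b,c=0,0,0
--     for i in n:
--         if i.isdigit():
--             a=1
--         elif i.isalpha():
--             b=1
--         else:
--             c=1
--     num=a+b+c
--     return num
-- ===== SOURCE B (Python) =====
-- def numchar(n):
--     has_digit = any(c.isdigit() for c in n)
--     has_alpha = any(c.isalpha() for c in n)
--     has_other = any(not c.isdigit() and not c.isalpha() for c in n)
--     return has_digit + has_alpha + has_other
-- ===== Notes on version B (the rewrite author's own statement) =====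
-- stated objective: simpler
-- what changed: Replaced the single interleaved loop maintaining three mutable flags with three independent any() scans, one per character category, summed as booleans.
import Mathlib
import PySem

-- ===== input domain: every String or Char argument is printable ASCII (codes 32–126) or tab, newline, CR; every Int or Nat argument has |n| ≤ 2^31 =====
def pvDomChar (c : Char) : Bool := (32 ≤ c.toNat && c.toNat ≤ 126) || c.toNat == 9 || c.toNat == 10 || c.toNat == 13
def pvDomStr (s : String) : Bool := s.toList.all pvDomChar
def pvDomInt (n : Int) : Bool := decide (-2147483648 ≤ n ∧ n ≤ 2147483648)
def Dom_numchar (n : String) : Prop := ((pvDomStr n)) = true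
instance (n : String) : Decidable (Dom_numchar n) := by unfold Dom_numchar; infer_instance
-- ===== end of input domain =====

-- ===== PORT A =====
-- literal port of A: one fold over the characters updating three flags (a,b,c)
def numchar (n : String) : Int :=
  let s := n.toList.foldl (fun (st : Int × Int × Int) i =>
    if PySem.Chars.isdigit i then (1, st.2.1, st.2.2)
    else if PySem.Chars.isalpha i then (st.1, 1, st.2.2)
    else (st.1, st.2.1, 1)) (0, 0, 0)
  s.1 + s.2.1 + s.2.2

-- ===== PORT B =====
-- port of B: three independent any-scans, one per category, summed as booleans
def numchar_alt (n : String) : Int :=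
  let hasDigit := n.toList.any (fun c => PySem.Chars.isdigit c)
  let hasAlpha := n.toList.any (fun c => PySem.Chars.isalpha c)
  let hasOther := n.toList.any (fun c => !PySem.Chars.isdigit c && !PySem.Chars.isalpha c)
  (if hasDigit then 1 else 0) + (if hasAlpha then 1 else 0) + (if hasOther then 1 else 0)

-- ===== PRECONDITION & SPEC =====
def Spec_numchar (n : String) (out : Int) : Prop := out = numchar_alt n
instance (n : String) (out : Int) : Decidable (Spec_numchar n out) := by unfold Spec_numchar; infer_instance

-- ===== CLAIM (what is proved, stated in full; the proofs are below) =====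
def Claim_equal_numchar : Prop := ∀ (n : String), Dom_numchar n → Spec_numchar n (numchar n)

-- ===== LEMMAS AND PROOFS =====
-- a digit character is never alphabetic (disjointness of the ASCII ranges)
theorem digit_not_alpha (c : Char) : PySem.Chars.isdigit c = true → PySem.Chars.isalpha c = false := by
  have e1 : ('0':Char).val.toNat = 48 := rfl
  have e2 : ('9':Char).val.toNat = 57 := rfl
  have e3 : ('A':Char).val.toNat = 65 := rfl
  have e4 : ('Z':Char).val.toNat = 90 := rfl
  have e5 : ('a':Char).val.toNat = 97 := rfl
  have e6 : ('z':Char).val.toNat = 122 := rfl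
  simp only [PySem.Chars.isdigit, PySem.Chars.isalpha, PySem.Chars.isupper, PySem.Chars.islower,
    Bool.and_eq_true, Bool.or_eq_false_iff, decide_eq_true_eq, Char.le_def]
  intro h
  simp only [Bool.and_eq_false_iff, decide_eq_false_iff_not,
    UInt32.le_iff_toNat_le, e1, e2, e3, e4, e5, e6] at *
  omega

-- flag invariant: the fold's state is exactly the three any-flags of the prefix
theorem numchar_foldl_eq (l : List Char) (a b c : Int) :
    l.foldl (fun (st : Int × Int × Int) i =>
      if PySem.Chars.isdigit i then (1, st.2.1, st.2.2)
      else if PySem.Chars.isalpha i then (st.1, 1, st.2.2)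
      else (st.1, st.2.1, 1)) (a, b, c) =
    ((if l.any (fun x => PySem.Chars.isdigit x) then 1 else a),
     (if l.any (fun x => PySem.Chars.isalpha x) then 1 else b),
     (if l.any (fun x => !PySem.Chars.isdigit x && !PySem.Chars.isalpha x) then 1 else c)) := by
  induction l generalizing a b c with
  | nil => simp
  | cons h t ih =>
    simp only [List.foldl_cons, List.any_cons]
    by_cases hd : PySem.Chars.isdigit h
    · simp [hd, digit_not_alpha h hd, ih]
    · by_cases ha : PySem.Chars.isalpha h
      · simp [hd, ha, ih]
      · simp [hd, ha, ih]

-- ===== VERDICT (by name: the statement is the Claim_ definition above) =====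
theorem numchar_spec : Claim_equal_numchar := by
  intro n _
  unfold Spec_numchar numchar numchar_alt
  simp only [numchar_foldl_eq]
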